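-- pv_equiv track=rewrite | github.com/zheedong/BaekJoon | python/6064.py | get_all_poss_years
-- ===== SOURCE A (Python) =====
-- def get_all_poss_years(m, n):
--     ret = []
--     x, y = (1, 1)
--     while(True):
--         ret.append((x, y))
--         if x == m and y == n:
--             return ret
--         x = x + 1 if x < m else 1
--         y = y + 1 if y < n else 1
-- ===== SOURCE B (Python) =====
-- import math
--
-- def get_all_poss_years(m, n):
--     L = m * n // math.gcd(m, n)
--     return [(k % m + 1, k % n + 1) for k in range(L)]
-- ===== Notes on version B (the rewrite author's own statement) =====
-- stated objective: simpler
-- what changed: Replaces the incremental wrapping (x,y) counters with a closed-form length L = lcm(m,n) and a direct per-index modular comprehension.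
import Mathlib
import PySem

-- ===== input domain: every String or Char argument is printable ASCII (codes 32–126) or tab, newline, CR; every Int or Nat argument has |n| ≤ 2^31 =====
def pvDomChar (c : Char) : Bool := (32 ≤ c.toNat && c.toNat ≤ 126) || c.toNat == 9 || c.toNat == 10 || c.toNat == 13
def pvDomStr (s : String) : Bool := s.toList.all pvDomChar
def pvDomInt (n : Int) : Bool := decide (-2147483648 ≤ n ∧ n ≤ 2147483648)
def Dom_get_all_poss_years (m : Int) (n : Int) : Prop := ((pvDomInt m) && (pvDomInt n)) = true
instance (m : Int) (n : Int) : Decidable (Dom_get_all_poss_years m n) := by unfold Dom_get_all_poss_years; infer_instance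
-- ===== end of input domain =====

-- B replaces A's incremental wrapping (x,y) counters and discovered stopping point with a
-- closed-form length L = lcm(m,n) and a per-index modular comprehension (objective: simpler).

-- ===== PORT A =====
-- A's 'while True' loop; the fuel argument only makes the recursion total: under
-- Pre_ (1 ≤ m, 1 ≤ n) the loop returns after lcm(m,n) ≤ |m*n| iterations, so fuel
-- |m*n|+1 is never exhausted and the fuel-0 branch is unreachable.
def pyLoopA (m n : Int) : Nat → Int → Int → List (Int × Int) → List (Int × Int)
  | 0, _, _, ret => ret
  | fuel + 1, x, y, ret =>
    let ret' := ret ++ [(x, y)]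
    if x = m ∧ y = n then ret'
    else pyLoopA m n fuel (if x < m then x + 1 else 1) (if y < n then y + 1 else 1) ret'

def get_all_poss_years (m : Int) (n : Int) : List (Int × Int) :=
  pyLoopA m n ((m * n).natAbs + 1) 1 1 []

-- ===== PORT B =====
def get_all_poss_years_alt (m : Int) (n : Int) : List (Int × Int) :=
  let L := PySem.Int.floordiv (m * n) (Int.gcd m n)
  (PySem.List.pyRange 0 L 1).map (fun k => (PySem.Int.mod k m + 1, PySem.Int.mod k n + 1))

-- ===== PRECONDITION & SPEC =====
-- Pre_ excludes exactly the inputs where A never returns: for m ≤ 0 or n ≤ 0 the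
-- counter x (resp. y) never equals m (resp. n), so A's while-loop diverges.
def Pre_get_all_poss_years (m : Int) (n : Int) : Prop := 1 ≤ m ∧ 1 ≤ n
instance (m : Int) (n : Int) : Decidable (Pre_get_all_poss_years m n) := by unfold Pre_get_all_poss_years; infer_instance
def pvWitness_get_all_poss_years : Int × Int := (4, 6)

def Spec_get_all_poss_years (m : Int) (n : Int) (out : List (Int × Int)) : Prop := out = get_all_poss_years_alt m n
instance (m : Int) (n : Int) (out : List (Int × Int)) : Decidable (Spec_get_all_poss_years m n out) := by unfold Spec_get_all_poss_years; infer_instance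

-- ===== CLAIM (what is proved, stated in full; the proofs are below) =====
def Claim_equal_get_all_poss_years : Prop := ∀ (m : Int) (n : Int), Dom_get_all_poss_years m n → Pre_get_all_poss_years m n → Spec_get_all_poss_years m n (get_all_poss_years m n)

-- ===== LEMMAS AND PROOFS =====

-- the pair produced at step k, in B's closed form
def pvStep (m n : Int) (k : Nat) : Int × Int := ((k : Int) % m + 1, (k : Int) % n + 1)

lemma pvModSucc (a m : Int) (_hm : 0 < m) : (a + 1) % m = (a % m + 1) % m := by
  conv_lhs => rw [← Int.emod_add_mul_ediv a m]
  rw [show a % m + m * (a / m) + 1 = (a % m + 1) + m * (a / m) by ring]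
  exact Int.add_mul_emod_self_left (a % m + 1) m (a / m)

-- the wrapping increment advances the closed form by one step
lemma pvWrap (m : Int) (hm : 1 ≤ m) (k : Nat) :
    (if (k : Int) % m + 1 < m then (k : Int) % m + 1 + 1 else 1) = ((k : Int) + 1) % m + 1 := by
  have h0 : 0 ≤ (k : Int) % m := Int.emod_nonneg _ (by omega)
  have h1 : (k : Int) % m < m := Int.emod_lt_of_pos _ (by omega)
  rw [pvModSucc _ _ (by omega)]
  by_cases hc : (k : Int) % m + 1 < m
  · rw [if_pos hc, Int.emod_eq_of_lt (by omega) hc]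
  · rw [if_neg hc, show (k : Int) % m + 1 = m by omega, Int.emod_self]; omega

-- the stop test "x = m" is divisibility of k+1 by m
lemma pvStopOne (m : Int) (hm : 1 ≤ m) (k : Nat) :
    ((k : Int) % m + 1 = m) ↔ m ∣ (k : Int) + 1 := by
  have h0 : 0 ≤ (k : Int) % m := Int.emod_nonneg _ (by omega)
  have h1 : (k : Int) % m < m := Int.emod_lt_of_pos _ (by omega)
  rw [Int.dvd_iff_emod_eq_zero, pvModSucc _ _ (by omega)]
  by_cases hc : (k : Int) % m + 1 < m
  · rw [Int.emod_eq_of_lt (by omega) hc]; omega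
  · constructor
    · intro h; rw [h, Int.emod_self]
    · intro h
      by_contra hne
      have : (k : Int) % m + 1 = m := by omega
      omega

-- loop invariant: starting at step k with the closed-form state, A's loop appends
-- exactly the closed-form pairs for steps k, k+1, …, lcm(m,n)-1
lemma pvLoopInv (m n : Int) (hm : 1 ≤ m) (hn : 1 ≤ n) :
    ∀ (f k : Nat) (ret : List (Int × Int)), k < Int.lcm m n → Int.lcm m n ≤ k + f →
      pyLoopA m n f ((k : Int) % m + 1) ((k : Int) % n + 1) ret
        = ret ++ (List.range (Int.lcm m n - k)).map (fun i => pvStep m n (k + i)) := by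
  intro f
  induction f with
  | zero => intro k ret hk hf; omega
  | succ f ih =>
    intro k ret hk hf
    rw [pyLoopA]
    by_cases hstop : (k : Int) % m + 1 = m ∧ (k : Int) % n + 1 = n
    · have hdvd : (Int.lcm m n : Int) ∣ (k : Int) + 1 :=
        Int.coe_lcm_dvd ((pvStopOne m hm k).mp hstop.1) ((pvStopOne n hn k).mp hstop.2)
      have hdvdN : Int.lcm m n ∣ k + 1 := by exact_mod_cast hdvd
      have hEq : k + 1 = Int.lcm m n := le_antisymm (by omega) (Nat.le_of_dvd (by omega) hdvdN)
      rw [if_pos hstop, show Int.lcm m n - k = 1 by omega]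
      simp [pvStep]
    · have hdvd : ¬ (Int.lcm m n : Int) ∣ (k : Int) + 1 := by
        intro h
        have hN : Int.lcm m n ∣ k + 1 := by exact_mod_cast h
        rcases (Nat.le_of_dvd (by omega) hN).lt_or_eq with h' | h'
        · have hmk : m ∣ (k : Int) + 1 :=
            dvd_trans (Int.dvd_lcm_left m n) h
          have hnk : n ∣ (k : Int) + 1 :=
            dvd_trans (Int.dvd_lcm_right m n) h
          exact hstop ⟨(pvStopOne m hm k).mpr hmk, (pvStopOne n hn k).mpr hnk⟩
        · exact hstop ⟨(pvStopOne m hm k).mpr (dvd_trans (Int.dvd_lcm_left m n) h),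
            (pvStopOne n hn k).mpr (dvd_trans (Int.dvd_lcm_right m n) h)⟩
      have hklt : k + 1 < Int.lcm m n := by
        rcases Nat.lt_or_ge (k + 1) (Int.lcm m n) with h | h
        · exact h
        · exfalso
          have : k + 1 = Int.lcm m n := by omega
          exact hdvd (this ▸ dvd_refl _)
      have ih' := ih (k + 1) (ret ++ [((k : Int) % m + 1, (k : Int) % n + 1)]) hklt (by omega)
      push_cast at ih'
      rw [if_neg hstop, pvWrap m hm k, pvWrap n hn k, ih']
      rw [show Int.lcm m n - k = (Int.lcm m n - (k + 1)) + 1 by omega,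
          List.range_succ_eq_map, List.map_cons, List.map_map]
      have hhead : pvStep m n (k + 0) = ((k : Int) % m + 1, (k : Int) % n + 1) := by
        simp [pvStep]
      have htail : (List.range (Int.lcm m n - (k + 1))).map
            ((fun i => pvStep m n (k + i)) ∘ (· + 1))
          = (List.range (Int.lcm m n - (k + 1))).map (fun i => pvStep m n (k + 1 + i)) := by
        apply List.map_congr_left
        intro a _
        simp only [Function.comp_apply]
        congr 1
        omega
      rw [hhead, htail, List.append_assoc, List.singleton_append]

-- B's length expression m*n // gcd(m,n) is the lcm
lemma pvLenEq (m n : Int) (hm : 1 ≤ m) (hn : 1 ≤ n) :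
    PySem.Int.floordiv (m * n) (Int.gcd m n) = (Int.lcm m n : Int) := by
  rw [PySem.Int.floordiv_eq_ediv_of_pos (by exact_mod_cast Int.gcd_pos_of_ne_zero_left n (by omega))]
  rw [Int.lcm, Nat.lcm, Int.gcd]
  rw [show m * n = ((m.natAbs * n.natAbs : Nat) : Int) by
    push_cast; rw [abs_of_pos (by omega : (0:Int) < m), abs_of_pos (by omega : (0:Int) < n)]]
  exact_mod_cast (Int.natCast_div _ _).symm

lemma pvLcmLe (m n : Int) (hm : 1 ≤ m) (hn : 1 ≤ n) : Int.lcm m n ≤ (m * n).natAbs := by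
  have hd : Int.lcm m n ∣ (m * n).natAbs := by rw [Int.natAbs_mul]; exact Nat.lcm_dvd_mul _ _
  refine Nat.le_of_dvd ?_ hd
  have : m * n ≠ 0 := by positivity
  omega

lemma pvLcmPos (m n : Int) (hm : 1 ≤ m) (hn : 1 ≤ n) : 0 < Int.lcm m n :=
  Nat.pos_of_ne_zero (by simp [Int.lcm, Nat.lcm_eq_zero_iff]; constructor <;> omega)

-- ===== VERDICT (by name: the statement is the Claim_ definition above) =====
theorem get_all_poss_years_spec : Claim_equal_get_all_poss_years := by
  intro m n _ hpre
  obtain ⟨hm, hn⟩ := hpre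
  have hA : get_all_poss_years m n
      = (List.range (Int.lcm m n)).map (fun i => pvStep m n i) := by
    have h := pvLoopInv m n hm hn ((m * n).natAbs + 1) 0 [] (pvLcmPos m n hm hn)
      (by have := pvLcmLe m n hm hn; omega)
    simp only [Nat.cast_zero, Int.zero_emod, zero_add, List.nil_append,
      Nat.sub_zero] at h
    simpa [get_all_poss_years] using h
  have hB : get_all_poss_years_alt m n
      = (List.range (Int.lcm m n)).map (fun i => pvStep m n i) := by
    show (PySem.List.pyRange 0 (PySem.Int.floordiv (m * n) (Int.gcd m n)) 1).map
        (fun k => (PySem.Int.mod k m + 1, PySem.Int.mod k n + 1)) = _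
    rw [pvLenEq m n hm hn, PySem.List.pyRange_one]
    simp only [List.map_map, Int.sub_zero, Int.toNat_natCast]
    apply List.map_congr_left
    intro i hi
    simp only [Function.comp_apply, pvStep, Int.zero_add]
    rw [PySem.Int.mod_eq_emod_of_pos (by omega : (0:Int) < m),
        PySem.Int.mod_eq_emod_of_pos (by omega : (0:Int) < n)]
  unfold Spec_get_all_poss_years
  rw [hA, hB]
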